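-- pv_equiv track=rewrite | github.com/paul-nguyen-1/DashHub | server/routers/process.py | suggest_dashboard
-- ===== SOURCE A (Python) =====
-- DASHBOARD_TYPES = [
--     {
--         "id": "sales",
--         "label": "Sales Performance",
--         "description": "Revenue over time, by region and rep. Includes anomaly detection.",
--         "keywords": ["revenue", "sales", "deal", "rep", "quota", "pipeline", "won", "lost"],
--     },
--     {
--         "id": "hr",
--         "label": "HR & Headcount",
--         "description": "Headcount trends, attrition, department breakdown, and tenure.",
--         "keywords": ["employee", "headcount", "department", "hire", "termination", "tenure", "salary", "attrition"],
--     },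
--     {
--         "id": "finance",
--         "label": "Finance Overview",
--         "description": "Budget vs actuals, expense categories, and period-over-period variance.",
--         "keywords": ["budget", "expense", "cost", "balance", "account", "ledger", "invoice", "payment"],
--     },
--     {
--         "id": "inventory",
--         "label": "Inventory & Supply",
--         "description": "Stock levels, turnover rates, and supplier performance.",
--         "keywords": ["inventory", "stock", "sku", "warehouse", "quantity", "supplier", "reorder", "shipment"],
--     },
--     {
--         "id": "marketing",
--         "label": "Marketing Analytics",
--         "description": "Lead volume, conversion rates, channel performance, and CAC.",
--         "keywords": ["lead", "conversion", "campaign", "channel", "impression", "click", "cac", "cpl"],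
--     },
--     {
--         "id": "support",
--         "label": "Support & Operations",
--         "description": "Ticket volume, resolution time, CSAT, and priority breakdown.",
--         "keywords": ["ticket", "issue", "priority", "resolution", "csat", "agent", "sla", "status"],
--     },
-- ]
--
-- def suggest_dashboard(col_names: list[str]) -> dict:
--     joined = " ".join(col_names).lower()
--     scores = []
--     for dt in DASHBOARD_TYPES:
--         score = sum(1 for kw in dt["keywords"] if kw in joined)
--         scores.append((score, dt))
--
--     scores.sort(key=lambda x: x[0], reverse=True)
--     best_score, best = scores[0]
--
--     if best_score == 0:
--         return {
--             "id": "general",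
--             "label": "General Dashboard",
--             "description": "Overview of your data with charts for each numeric column.",
--         }
--     return {k: best[k] for k in ("id", "label", "description")}
-- ===== SOURCE B (Python) =====
-- DASHBOARD_TYPES = [
--     {
--         "id": "sales",
--         "label": "Sales Performance",
--         "description": "Revenue over time, by region and rep. Includes anomaly detection.",
--         "keywords": ["revenue", "sales", "deal", "rep", "quota", "pipeline", "won", "lost"],
--     },
--     {
--         "id": "hr",
--         "label": "HR & Headcount",
--         "description": "Headcount trends, attrition, department breakdown, and tenure.",
--         "keywords": ["employee", "headcount", "department", "hire", "termination", "tenure", "salary", "attrition"],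
--     },
--     {
--         "id": "finance",
--         "label": "Finance Overview",
--         "description": "Budget vs actuals, expense categories, and period-over-period variance.",
--         "keywords": ["budget", "expense", "cost", "balance", "account", "ledger", "invoice", "payment"],
--     },
--     {
--         "id": "inventory",
--         "label": "Inventory & Supply",
--         "description": "Stock levels, turnover rates, and supplier performance.",
--         "keywords": ["inventory", "stock", "sku", "warehouse", "quantity", "supplier", "reorder", "shipment"],
--     },
--     {
--         "id": "marketing",
--         "label": "Marketing Analytics",
--         "description": "Lead volume, conversion rates, channel performance, and CAC.",
--         "keywords": ["lead", "conversion", "campaign", "channel", "impression", "click", "cac", "cpl"],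
--     },
--     {
--         "id": "support",
--         "label": "Support & Operations",
--         "description": "Ticket volume, resolution time, CSAT, and priority breakdown.",
--         "keywords": ["ticket", "issue", "priority", "resolution", "csat", "agent", "sla", "status"],
--     },
-- ]
--
--
-- def suggest_dashboard(col_names: list[str]) -> dict:
--     joined = " ".join(col_names).lower()
--
--     def score(dt):
--         return sum(1 for kw in dt["keywords"] if kw in joined)
--
--     # max keeps the FIRST maximal element, matching A's stable descending sort.
--     best = max(DASHBOARD_TYPES, key=score)
--     if score(best) == 0:
--         return {
--             "id": "general",
--             "label": "General Dashboard",
--             "description": "Overview of your data with charts for each numeric column.",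
--         }
--     return {"id": best["id"], "label": best["label"], "description": best["description"]}
-- ===== Notes on version B (the rewrite author's own statement) =====
-- stated objective: simpler
-- what changed: B replaces A's build-all-(score,type)-pairs plus stable descending sort plus take-scores[0] with a single max(DASHBOARD_TYPES, key=score) pass (max keeps the first maximal element, matching the stable sort's tie-break).
import Mathlib
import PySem

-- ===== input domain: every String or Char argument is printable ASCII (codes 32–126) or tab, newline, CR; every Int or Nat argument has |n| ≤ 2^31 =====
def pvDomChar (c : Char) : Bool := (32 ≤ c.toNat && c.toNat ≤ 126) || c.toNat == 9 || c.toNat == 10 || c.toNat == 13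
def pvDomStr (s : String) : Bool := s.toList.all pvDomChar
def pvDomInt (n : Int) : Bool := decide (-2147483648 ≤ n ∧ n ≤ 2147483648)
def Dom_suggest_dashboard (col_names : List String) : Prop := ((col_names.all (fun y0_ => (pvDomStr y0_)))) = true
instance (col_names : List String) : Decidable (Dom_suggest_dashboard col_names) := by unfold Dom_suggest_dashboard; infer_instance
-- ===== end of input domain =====

-- B replaces A's build-pairs + stable descending sort + take-first with a single first-max pass (simpler; same result, first-max matches the stable sort's tie-break).


-- Shared module constant: DASHBOARD_TYPES as (id, label, description, keywords) tuples.
def DASHBOARD_TYPES : List (String × String × String × List String) :=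
  [ ("sales", "Sales Performance", "Revenue over time, by region and rep. Includes anomaly detection.",
      ["revenue", "sales", "deal", "rep", "quota", "pipeline", "won", "lost"]),
    ("hr", "HR & Headcount", "Headcount trends, attrition, department breakdown, and tenure.",
      ["employee", "headcount", "department", "hire", "termination", "tenure", "salary", "attrition"]),
    ("finance", "Finance Overview", "Budget vs actuals, expense categories, and period-over-period variance.",
      ["budget", "expense", "cost", "balance", "account", "ledger", "invoice", "payment"]),
    ("inventory", "Inventory & Supply", "Stock levels, turnover rates, and supplier performance.",
      ["inventory", "stock", "sku", "warehouse", "quantity", "supplier", "reorder", "shipment"]),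
    ("marketing", "Marketing Analytics", "Lead volume, conversion rates, channel performance, and CAC.",
      ["lead", "conversion", "campaign", "channel", "impression", "click", "cac", "cpl"]),
    ("support", "Support & Operations", "Ticket volume, resolution time, CSAT, and priority breakdown.",
      ["ticket", "issue", "priority", "resolution", "csat", "agent", "sla", "status"]) ]

def generalDashboard : List (String × String) :=
  [ ("id", "general"), ("label", "General Dashboard"),
    ("description", "Overview of your data with charts for each numeric column.") ]

-- ===== PORT A =====
def suggest_dashboard (col_names : List String) : List (String × String) :=
  let joined := PySem.Str.lower (PySem.Str.join " " col_names)
  let scores := DASHBOARD_TYPES.map (fun dt =>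
    (((dt.2.2.2).map (fun kw => if PySem.Str.isIn kw joined then (1 : Int) else 0)).sum, dt))
  match PySem.List.sorted scores (fun x => x.1) true with
  | [] => []  -- unreachable: scores is nonempty (totality guard for scores[0])
  | (best_score, best) :: _ =>
    if best_score == 0 then generalDashboard
    else [("id", best.1), ("label", best.2.1), ("description", best.2.2.1)]

-- ===== PORT B =====
-- B's local helper `score`
def sdScore (joined : String) (dt : String × String × String × List String) : Int :=
  ((dt.2.2.2).map (fun kw => if PySem.Str.isIn kw joined then (1 : Int) else 0)).sum

def suggest_dashboard_alt (col_names : List String) : List (String × String) :=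
  let joined := PySem.Str.lower (PySem.Str.join " " col_names)
  match PySem.List.max? DASHBOARD_TYPES (fun dt => sdScore joined dt) with
  | none => []  -- unreachable: DASHBOARD_TYPES is nonempty (totality guard for max())
  | some best =>
    if sdScore joined best == 0 then generalDashboard
    else [("id", best.1), ("label", best.2.1), ("description", best.2.2.1)]

-- ===== PRECONDITION & SPEC =====
def Spec_suggest_dashboard (col_names : List String) (out : List (String × String)) : Prop := out = suggest_dashboard_alt col_names
instance (col_names : List String) (out : List (String × String)) : Decidable (Spec_suggest_dashboard col_names out) := by unfold Spec_suggest_dashboard; infer_instance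

-- ===== CLAIM (what is proved, stated in full; the proofs are below) =====
def Claim_equal_suggest_dashboard : Prop := ∀ (col_names : List String), Dom_suggest_dashboard col_names → Spec_suggest_dashboard col_names (suggest_dashboard col_names)

-- ===== LEMMAS AND PROOFS =====

theorem head_sorted_rev_eq_max? {α κ : Type} [LT κ] [DecidableLT κ] (xs : List α) (key : α → κ) :
    (PySem.List.sorted xs key true).head? = PySem.List.max? xs key := by
  induction xs using List.reverseRecOn with
  | nil => rfl
  | append_singleton ys x ih =>
    have hs : PySem.List.sorted (ys ++ [x]) key true =
        PySem.List.insertBy (fun a b => decide (key b < key a)) x (PySem.List.sorted ys key true) := by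
      rw [PySem.List.sorted_rev_eq_foldl_insertBy, PySem.List.sorted_rev_eq_foldl_insertBy,
        List.foldl_append, List.foldl_cons, List.foldl_nil]
    rw [hs]
    cases ho : PySem.List.max? ys key with
    | none =>
      have hys : ys = [] := (PySem.List.max?_eq_none_iff _ _).mp ho
      subst hys; rfl
    | some m =>
      rw [ho] at ih
      simp only [PySem.List.max?] at ih ho ⊢
      simp only [List.foldl_append, List.foldl_cons, List.foldl_nil, ho]
      cases hsrt : PySem.List.sorted ys key true with
      | nil =>
        rw [hsrt] at ih; simp at ih
      | cons y t =>
        rw [hsrt] at ih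
        simp only [List.head?_cons, Option.some.injEq] at ih
        subst ih
        by_cases hk : key y < key x <;> simp [PySem.List.insertBy, hk]
theorem max?_map_pair {α κ : Type} [LT κ] [DecidableLT κ] (xs : List α) (sc : α → κ) :
    PySem.List.max? (xs.map (fun x => (sc x, x))) (fun p => p.1) =
      (PySem.List.max? xs sc).map (fun x => (sc x, x)) := by
  induction xs using List.reverseRecOn with
  | nil => rfl
  | append_singleton ys x ih =>
    cases ho : PySem.List.max? ys sc with
    | none =>
      have hys : ys = [] := (PySem.List.max?_eq_none_iff _ _).mp ho
      subst hys; rfl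
    | some m =>
      rw [ho] at ih
      simp only [PySem.List.max?] at ih ho ⊢
      simp only [List.map_append, List.map_cons, List.map_nil, List.foldl_append,
        List.foldl_cons, List.foldl_nil, ih, ho, Option.map_some]
      by_cases hc : sc m < sc x <;> simp [hc]

-- ===== VERDICT (by name: the statement is the Claim_ definition above) =====
theorem suggest_dashboard_spec : Claim_equal_suggest_dashboard := by
  intro col_names _
  unfold Spec_suggest_dashboard
  show suggest_dashboard col_names = suggest_dashboard_alt col_names
  unfold suggest_dashboard suggest_dashboard_alt
  generalize PySem.Str.lower (PySem.Str.join " " col_names) = joined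
  simp only [sdScore]
  cases hb : PySem.List.max? DASHBOARD_TYPES (fun dt =>
      ((dt.2.2.2).map (fun kw => if PySem.Str.isIn kw joined then (1 : Int) else 0)).sum) with
  | none =>
    exact absurd ((PySem.List.max?_eq_none_iff _ _).mp hb) (by simp [DASHBOARD_TYPES])
  | some best =>
    have hkey : (PySem.List.sorted (DASHBOARD_TYPES.map (fun dt =>
        (((dt.2.2.2).map (fun kw => if PySem.Str.isIn kw joined then (1 : Int) else 0)).sum, dt)))
        (fun x => x.1) true).head? = some ((((best.2.2.2).map (fun kw =>
          if PySem.Str.isIn kw joined then (1 : Int) else 0)).sum, best)) := by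
      rw [head_sorted_rev_eq_max?, max?_map_pair, hb]; rfl
    cases hsrt : PySem.List.sorted (DASHBOARD_TYPES.map (fun dt =>
        (((dt.2.2.2).map (fun kw => if PySem.Str.isIn kw joined then (1 : Int) else 0)).sum, dt)))
        (fun x => x.1) true with
    | nil => rw [hsrt] at hkey; simp at hkey
    | cons p t =>
      rw [hsrt] at hkey
      simp only [List.head?_cons, Option.some.injEq] at hkey
      subst hkey
      rfl
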